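-- pv_equiv track=rewrite | github.com/IvPalmer/record-label-manager | backend/finances/management/commands/import_validated.py | is_valid_bandcamp_row
-- ===== SOURCE A (Python) =====
-- def is_valid_bandcamp_row(row):
--     """Simple structural validation for Bandcamp"""
--     # Count non-empty columns
--     values = [str(value or '').strip() for value in row.values()]
--     non_empty_count = sum(1 for value in values if value)
--
--     # Must have at least 6 columns filled
--     if non_empty_count < 6:
--         return False
--
--     # Must have date field
--     date_str = (row.get('date', '') or '').strip()
--     if not date_str:
--         return False
--
--     # Skip admin transactions only
--     row_text = ' '.join(values).upper()
--     if 'PAYOUT' in row_text or 'PAYMENT' in row_text: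
--         return False
--
--     return True
-- ===== SOURCE B (Python) =====
-- def is_valid_bandcamp_row(row):
--     """Short-circuit validation: require the date up front, then walk the
--     values once, rejecting IMMEDIATELY on a payout/payment marker and
--     counting DOWN a quota of 6 non-empty cells (A instead stages three
--     full passes: build a stripped list, count it, join+uppercase it and
--     scan the joined text)."""
--     if not (row.get('date', '') or '').strip():
--         return False
--     need = 6
--     for value in row.values():
--         s = str(value or '').strip()
--         u = s.upper()
--         if 'PAYOUT' in u or 'PAYMENT' in u:
--             return False
--         if s:
--             need -= 1
--     return need <= 0
-- ===== Notes on version B (the rewrite author's own statement) =====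
-- stated objective: alternative
-- what changed: A stages three full passes (build a stripped-value list, count it, join+uppercase the whole row and scan the joined copy) with the date looked up in between; B checks the date first and then makes one short-circuiting walk that returns False the moment a PAYOUT/PAYMENT marker appears, draining a countdown quota of 6 non-empty cells and finally testing quota exhaustion - no intermediate list, no joined string (correct because the sentinels contain no space, so they cannot span A's join boundaries).
import Mathlib
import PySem

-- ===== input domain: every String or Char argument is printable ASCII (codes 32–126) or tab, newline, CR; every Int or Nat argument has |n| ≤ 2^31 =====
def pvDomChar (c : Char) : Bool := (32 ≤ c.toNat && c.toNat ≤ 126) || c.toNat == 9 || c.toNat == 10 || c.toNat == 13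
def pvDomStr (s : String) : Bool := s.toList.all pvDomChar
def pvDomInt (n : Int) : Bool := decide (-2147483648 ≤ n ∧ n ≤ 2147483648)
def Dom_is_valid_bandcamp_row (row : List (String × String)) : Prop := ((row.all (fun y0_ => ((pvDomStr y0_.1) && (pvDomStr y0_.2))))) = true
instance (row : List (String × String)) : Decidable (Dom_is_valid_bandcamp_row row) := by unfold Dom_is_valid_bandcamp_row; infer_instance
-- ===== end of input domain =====

-- B replaces A's three staged passes (stripped-value list, count, join+uppercase+scan) by a
-- date-first, short-circuiting walk with a countdown quota (alternative decomposition, same cost).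

-- ===== PORT A =====
-- on string values `str(value or '')` is the identity, so the comprehension strips each value
def is_valid_bandcamp_row (row : List (String × String)) : Bool :=
  let values := row.map (fun p => PySem.Str.strip p.2)
  let non_empty_count : Int :=
    values.foldl (fun acc v => if v ≠ "" then acc + 1 else acc) 0
  if non_empty_count < 6 then false
  else
    -- `(row.get('date','') or '').strip()`: the `or ''` is the identity on string values
    let date_str := PySem.Str.strip (PySem.Dict.getD (PySem.Dict.mk row) "date" "")
    if date_str = "" then false
    else
      let row_text := PySem.Str.upper (PySem.Str.join " " values)
      if PySem.Str.isIn "PAYOUT" row_text || PySem.Str.isIn "PAYMENT" row_text then false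
      else true

-- ===== PORT B =====
-- the `for` loop with an in-loop `return False`, transcribed as structural recursion
def bandcampScan : List (String × String) → Int → Bool
  | [], need => decide (need ≤ 0)
  | p :: rest, need =>
      let s := PySem.Str.strip p.2
      let u := PySem.Str.upper s
      if PySem.Str.isIn "PAYOUT" u || PySem.Str.isIn "PAYMENT" u then false
      else bandcampScan rest (if s ≠ "" then need - 1 else need)

def is_valid_bandcamp_row_alt (row : List (String × String)) : Bool :=
  if PySem.Str.strip (PySem.Dict.getD (PySem.Dict.mk row) "date" "") = "" then false
  else bandcampScan row 6

-- ===== PRECONDITION & SPEC =====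
def Spec_is_valid_bandcamp_row (row : List (String × String)) (out : Bool) : Prop := out = is_valid_bandcamp_row_alt row
instance (row : List (String × String)) (out : Bool) : Decidable (Spec_is_valid_bandcamp_row row out) := by unfold Spec_is_valid_bandcamp_row; infer_instance

-- ===== CLAIM (what is proved, stated in full; the proofs are below) =====
def Claim_equal_is_valid_bandcamp_row : Prop := ∀ (row : List (String × String)), Dom_is_valid_bandcamp_row row → Spec_is_valid_bandcamp_row row (is_valid_bandcamp_row row)

-- ===== LEMMAS AND PROOFS =====

-- per-value sentinel test used to characterise both sides
def pvSent (p : String × String) : Bool :=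
  PySem.Str.isIn "PAYOUT" (PySem.Str.upper (PySem.Str.strip p.2))
    || PySem.Str.isIn "PAYMENT" (PySem.Str.upper (PySem.Str.strip p.2))

-- number of non-empty stripped values
def pvCnt : List (String × String) → Int
  | [] => 0
  | p :: rest => (if PySem.Str.strip p.2 ≠ "" then 1 else 0) + pvCnt rest

lemma foldl_count_eq (l : List (String × String)) (acc : Int) :
    (l.map (fun p => PySem.Str.strip p.2)).foldl
        (fun acc v => if v ≠ "" then acc + 1 else acc) acc = acc + pvCnt l := by
  induction l generalizing acc with
  | nil => simp [pvCnt]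
  | cons p rest ih =>
    simp only [List.map_cons, List.foldl_cons, pvCnt, ih]
    split_ifs <;> ring

-- B's loop computes: no sentinel anywhere AND the quota is met
set_option maxHeartbeats 1000000 in
lemma bandcampScan_eq (l : List (String × String)) (need : Int) :
    bandcampScan l need = (l.all (fun p => ! pvSent p) && decide (need ≤ pvCnt l)) := by
  induction l generalizing need with
  | nil => simp [bandcampScan, pvCnt]
  | cons p rest ih =>
    have e : bandcampScan (p :: rest) need
        = (if pvSent p then false
           else bandcampScan rest (if PySem.Str.strip p.2 ≠ "" then need - 1 else need)) := rfl
    rw [e, List.all_cons]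
    rcases Bool.eq_false_or_eq_true (pvSent p) with hs | hs
    · rw [if_pos hs, hs]
      simp
    · rw [if_neg (by rw [hs]; exact Bool.false_ne_true), ih, hs]
      simp only [Bool.not_false, Bool.true_and, pvCnt]
      have h2 : decide ((if PySem.Str.strip p.2 ≠ "" then need - 1 else need) ≤ pvCnt rest)
          = decide (need ≤ (if PySem.Str.strip p.2 ≠ "" then (1:Int) else 0) + pvCnt rest) := by
        rw [decide_eq_decide]
        split_ifs <;> omega
      rw [h2]
      rfl

-- a substring not containing c lies entirely left or entirely right of an occurrence of c
lemma infix_append_cons_iff {sub a b : List Char} {c : Char} (hc : c ∉ sub) :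
    sub <:+: (a ++ c :: b) ↔ sub <:+: a ∨ sub <:+: b := by
  constructor
  · rintro ⟨s, t, hst⟩
    rw [List.append_assoc] at hst
    rcases List.append_eq_append_iff.mp hst with ⟨as, ha, hrest⟩ | ⟨bs, hs, hrest⟩
    · rcases List.append_eq_append_iff.mp hrest with ⟨u, hu, ht⟩ | ⟨u, hu, ht⟩
      · exact Or.inl ⟨s, u, by rw [ha, hu]; simp⟩
      · cases u with
        | nil =>
          simp at hu
          exact Or.inl ⟨s, [], by rw [ha, hu]; simp⟩
        | cons d u' =>
          exfalso; apply hc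
          obtain ⟨hcd, -⟩ := List.cons_eq_cons.mp ht
          rw [hu, ← hcd]
          simp
    · cases bs with
      | nil =>
        simp at hrest
        cases sub with
        | nil => exact Or.inl (List.nil_infix)
        | cons d sub' =>
          exfalso; apply hc
          obtain ⟨hcd, -⟩ := List.cons_eq_cons.mp (by simpa using hrest)
          simp [hcd]
      | cons d bs' =>
        obtain ⟨-, hb⟩ := List.cons_eq_cons.mp (by simpa using hrest)
        exact Or.inr ⟨bs', t, by rw [hb]; simp⟩
  · rintro (⟨s, t, h⟩ | ⟨s, t, h⟩)
    · exact ⟨s, t ++ c :: b, by rw [← h]; simp⟩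
    · exact ⟨a ++ c :: s, t, by rw [← h]; simp⟩

lemma upper_join_sp (parts : List (List Char)) :
    PySem.Chars.upper (PySem.Chars.join [' '] parts)
      = PySem.Chars.join [' '] (parts.map PySem.Chars.upper) := by
  induction parts with
  | nil => simp [PySem.Chars.join_nil, PySem.Chars.upper]
  | cons p rest ih =>
    cases rest with
    | nil => simp [PySem.Chars.join_singleton]
    | cons q rest' =>
      rw [PySem.Chars.join_cons_cons, List.map_cons, List.map_cons,
          PySem.Chars.join_cons_cons, ← List.map_cons, ← ih]
      simp [PySem.Chars.upper, List.map_append]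
      decide

-- a space-free, non-empty needle is in the space-join iff it is in one of the parts
lemma isIn_join_any (sub : List Char) (hc : ' ' ∉ sub) (hne : sub ≠ []) (parts : List (List Char)) :
    PySem.Chars.isIn sub (PySem.Chars.join [' '] parts)
      = parts.any (fun v => PySem.Chars.isIn sub v) := by
  rw [Bool.eq_iff_iff, PySem.Chars.isIn_iff_infix, List.any_eq_true]
  simp only [PySem.Chars.isIn_iff_infix]
  induction parts with
  | nil => rw [PySem.Chars.join_nil]; simp [hne]
  | cons p rest ih =>
    cases rest with
    | nil => rw [PySem.Chars.join_singleton]; simp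
    | cons q rest' =>
      rw [PySem.Chars.join_cons_cons]
      have h2 : p ++ [' '] ++ PySem.Chars.join [' '] (q :: rest')
          = p ++ ' ' :: PySem.Chars.join [' '] (q :: rest') := by simp
      rw [h2, infix_append_cons_iff hc, ih]
      simp

lemma str_isIn_upper_join (sub : String) (hc : ' ' ∉ sub.toList) (hne : sub.toList ≠ [])
    (vs : List String) :
    PySem.Str.isIn sub (PySem.Str.upper (PySem.Str.join " " vs))
      = vs.any (fun v => PySem.Str.isIn sub (PySem.Str.upper v)) := by
  rw [PySem.Str.isIn_eq, PySem.Str.toList_upper, PySem.Str.toList_join]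
  have hsp : " ".toList = [' '] := rfl
  rw [hsp, upper_join_sp, isIn_join_any sub.toList hc hne, List.any_map]
  simp [Function.comp_def, PySem.Str.isIn_eq, PySem.Str.toList_upper]

lemma all_not_eq_not_any {α : Type} (p : α → Bool) (l : List α) :
    (l.all fun x => ! p x) = ! l.any p := by
  induction l with
  | nil => rfl
  | cons x xs ih => simp [List.all_cons, List.any_cons, ih]

lemma any_or_split {α : Type} (p q : α → Bool) (l : List α) :
    (l.any fun x => p x || q x) = (l.any p || l.any q) := by
  induction l with
  | nil => rfl
  | cons x xs ih => simp [List.any_cons, ih]; ac_rfl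

-- ===== VERDICT (by name: the statement is the Claim_ definition above) =====
set_option maxHeartbeats 1000000 in
theorem is_valid_bandcamp_row_spec : Claim_equal_is_valid_bandcamp_row := by
  intro row _
  unfold Spec_is_valid_bandcamp_row
  simp only [is_valid_bandcamp_row, is_valid_bandcamp_row_alt]
  rw [foldl_count_eq row 0, bandcampScan_eq,
      str_isIn_upper_join "PAYOUT" (by decide) (by decide),
      str_isIn_upper_join "PAYMENT" (by decide) (by decide),
      List.any_map, List.any_map]
  rw [Function.comp_def, Function.comp_def, ← any_or_split]
  have hsent : (row.any fun x =>
      PySem.Str.isIn "PAYOUT" (PySem.Str.upper (PySem.Str.strip x.2))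
        || PySem.Str.isIn "PAYMENT" (PySem.Str.upper (PySem.Str.strip x.2)))
      = row.any pvSent := rfl
  rw [hsent]
  rw [all_not_eq_not_any pvSent row, Int.zero_add]
  by_cases hd : PySem.Str.strip (PySem.Dict.getD (PySem.Dict.mk row) "date" "") = ""
  · by_cases hcnt : pvCnt row < 6 <;> simp [hd, hcnt]
  · by_cases hcnt : pvCnt row < 6
    · rw [if_pos hcnt, if_neg hd, decide_eq_false (by omega : ¬ (6:Int) ≤ pvCnt row)]
      simp
    · rw [if_neg hcnt, if_neg hd, if_neg hd,
          decide_eq_true (by omega : (6:Int) ≤ pvCnt row)]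
      rcases Bool.eq_false_or_eq_true (row.any pvSent) with hs | hs <;> simp [hs]
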